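-- pv_equiv track=rewrite | github.com/mathpn/advent-of-code-2021 | day_18/snailfish_utils.py | parse_snailfish_number
-- ===== SOURCE A (Python) =====
-- def parse_snailfish_number(raw):
--     parsed = []
--     depth = 0
--     for char in raw:
--         if char == "[":
--             depth += 1
--         elif char == "]":
--             depth -= 1
--         elif char == ",":
--             continue
--         else:
--             parsed.append((int(char), depth))
--     return parsed
-- ===== SOURCE B (Python) =====
-- def parse_snailfish_number(raw):
--     def go(chars, depth):
--         if not chars:
--             return []
--         c, rest = chars[0], chars[1:]
--         if c == "[":
--             return go(rest, depth + 1)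
--         if c == "]":
--             return go(rest, depth - 1)
--         if c == ",":
--             return go(rest, depth)
--         return [(int(c), depth)] + go(rest, depth)
--     return go(list(raw), 0)
-- ===== Notes on version B (the rewrite author's own statement) =====
-- stated objective: alternative
-- what changed: Replaces A's single loop with a mutable accumulator and depth counter by a recursive descent over the character list that threads depth as a parameter and builds the result front-to-back by consing.
import Mathlib
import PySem

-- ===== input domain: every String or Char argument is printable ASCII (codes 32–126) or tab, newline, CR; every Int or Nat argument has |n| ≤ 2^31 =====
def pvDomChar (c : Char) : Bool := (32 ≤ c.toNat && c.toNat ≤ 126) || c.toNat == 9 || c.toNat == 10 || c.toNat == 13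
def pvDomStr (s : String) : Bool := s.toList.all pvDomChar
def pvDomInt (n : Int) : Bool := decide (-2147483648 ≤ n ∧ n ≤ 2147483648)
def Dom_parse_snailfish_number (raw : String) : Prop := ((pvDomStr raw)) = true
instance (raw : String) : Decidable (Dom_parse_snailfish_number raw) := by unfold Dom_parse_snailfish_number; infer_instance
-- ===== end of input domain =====

-- B re-implements the parse as a recursive descent threading depth as a parameter,
-- consing results front-to-back, instead of A's loop with a mutable accumulator and counter.

-- ===== PORT A =====
-- int(char): exact via PySem.Int.ofStr?; the .getD 0 default is unreachable under Pre_ (char is a digit there)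
def pvInt1 (c : Char) : Int := (PySem.Int.ofStr? (String.mk [c])).getD 0

def pvStepA (st : List (Int × Int) × Int) (c : Char) : List (Int × Int) × Int :=
  if c = '[' then (st.1, st.2 + 1)
  else if c = ']' then (st.1, st.2 - 1)
  else if c = ',' then st
  else (st.1 ++ [(pvInt1 c, st.2)], st.2)

def parse_snailfish_number (raw : String) : List (Int × Int) :=
  (raw.toList.foldl pvStepA ([], 0)).1

-- ===== PORT B =====
def pvGoAlt : List Char → Int → List (Int × Int)
  | [], _ => []
  | c :: rest, depth =>
    if c = '[' then pvGoAlt rest (depth + 1)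
    else if c = ']' then pvGoAlt rest (depth - 1)
    else if c = ',' then pvGoAlt rest depth
    else (pvInt1 c, depth) :: pvGoAlt rest depth

def parse_snailfish_number_alt (raw : String) : List (Int × Int) :=
  pvGoAlt raw.toList 0

-- ===== PRECONDITION & SPEC =====
-- Pre_ excludes exactly the inputs where Python's int(char) raises ValueError:
-- every character must be '[', ']', ',' or an ASCII digit.
def Pre_parse_snailfish_number (raw : String) : Prop :=
  raw.toList.all (fun c => c == '[' || c == ']' || c == ',' || c.isDigit) = true
instance (raw : String) : Decidable (Pre_parse_snailfish_number raw) := by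
  unfold Pre_parse_snailfish_number; infer_instance
def pvWitness_parse_snailfish_number : String := "[[1,9],[8,5]]"

def Spec_parse_snailfish_number (raw : String) (out : List (Int × Int)) : Prop := out = parse_snailfish_number_alt raw
instance (raw : String) (out : List (Int × Int)) : Decidable (Spec_parse_snailfish_number raw out) := by unfold Spec_parse_snailfish_number; infer_instance

-- ===== CLAIM (what is proved, stated in full; the proofs are below) =====
def Claim_equal_parse_snailfish_number : Prop := ∀ (raw : String), Dom_parse_snailfish_number raw → Pre_parse_snailfish_number raw → Spec_parse_snailfish_number raw (parse_snailfish_number raw)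

-- ===== LEMMAS AND PROOFS =====
theorem pvFold_eq_go (cs : List Char) (acc : List (Int × Int)) (d : Int) :
    (cs.foldl pvStepA (acc, d)).1 = acc ++ pvGoAlt cs d := by
  induction cs generalizing acc d with
  | nil => simp [pvGoAlt]
  | cons c rest ih =>
    simp only [List.foldl, pvStepA, pvGoAlt]
    split_ifs <;> simp [ih]

-- ===== VERDICT (by name: the statement is the Claim_ definition above) =====
theorem parse_snailfish_number_spec : Claim_equal_parse_snailfish_number := by
  intro raw _ _
  unfold Spec_parse_snailfish_number parse_snailfish_number parse_snailfish_number_alt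
  simpa using pvFold_eq_go raw.toList [] 0
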